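-- pv_equiv track=rewrite | github.com/FYP-Multi-line-APR/defects4j-setup | collect_context.py | add_bug_token_for_func
-- ===== SOURCE A (Python) =====
-- bug_token = "[BUG]"
--
-- def add_bug_token_for_func(lines, func_start, bug_start, bug_end):
--     result = []
--     for i in range(len(lines)):
--         line = lines[i]
--         curr_line = func_start + i
--         if bug_start <= curr_line and curr_line <= bug_end:
--             result.append(f"{bug_token} {line}")
--         else:
--             result.append(line)
--     return result
-- ===== SOURCE B (Python) =====
-- bug_token = "[BUG]"
--
-- def add_bug_token_for_func(lines, func_start, bug_start, bug_end):
--     lo = max(0, bug_start - func_start)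
--     hi = max(lo, min(len(lines), bug_end - func_start + 1))
--     return lines[:lo] + [f"{bug_token} {line}" for line in lines[lo:hi]] + lines[hi:]
-- ===== Notes on version B (the rewrite author's own statement) =====
-- stated objective: alternative
-- what changed: B precomputes the clamped overlap [lo,hi) of the bug range with the list indices once and assembles the result as three slices (untouched prefix + tagged window + untouched suffix) instead of testing the range condition per element in a loop.
import Mathlib
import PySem

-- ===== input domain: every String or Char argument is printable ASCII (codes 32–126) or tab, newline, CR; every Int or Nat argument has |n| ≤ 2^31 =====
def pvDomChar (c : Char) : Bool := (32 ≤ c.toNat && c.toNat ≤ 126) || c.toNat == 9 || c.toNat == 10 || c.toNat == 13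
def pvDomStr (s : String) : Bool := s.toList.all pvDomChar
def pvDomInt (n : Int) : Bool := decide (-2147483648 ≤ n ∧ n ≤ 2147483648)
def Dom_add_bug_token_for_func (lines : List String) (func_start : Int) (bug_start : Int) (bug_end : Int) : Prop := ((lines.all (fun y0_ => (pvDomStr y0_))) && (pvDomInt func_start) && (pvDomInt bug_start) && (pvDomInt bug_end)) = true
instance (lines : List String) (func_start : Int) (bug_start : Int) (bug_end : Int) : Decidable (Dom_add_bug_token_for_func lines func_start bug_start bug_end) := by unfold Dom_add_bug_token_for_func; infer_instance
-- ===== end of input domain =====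

-- B precomputes the clamped overlap [lo,hi) of the bug range with the list indices once and
-- assembles untouched-prefix ++ tagged-window ++ untouched-suffix, instead of A's per-element
-- range test inside the loop (objective: alternative; same asymptotic cost).

-- ===== PORT A =====
def add_bug_token_for_func (lines : List String) (func_start : Int) (bug_start : Int) (bug_end : Int) : List String :=
  (PySem.List.pyRange 0 (PySem.List.len lines) 1).foldl
    (fun result i =>
      let line := PySem.List.pyGetD lines i ""
      let curr_line := func_start + i
      if bug_start ≤ curr_line ∧ curr_line ≤ bug_end then
        result ++ ["[BUG] " ++ line]
      else
        result ++ [line])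
    []

-- ===== PORT B =====
def add_bug_token_for_func_alt (lines : List String) (func_start : Int) (bug_start : Int) (bug_end : Int) : List String :=
  let lo := max 0 (bug_start - func_start)
  let hi := max lo (min (PySem.List.len lines) (bug_end - func_start + 1))
  PySem.List.slice lines none (some lo)
    ++ (PySem.List.slice lines (some lo) (some hi)).map (fun line => "[BUG] " ++ line)
    ++ PySem.List.slice lines (some hi) none

-- ===== PRECONDITION & SPEC =====
def Spec_add_bug_token_for_func (lines : List String) (func_start : Int) (bug_start : Int) (bug_end : Int) (out : List String) : Prop := out = add_bug_token_for_func_alt lines func_start bug_start bug_end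
instance (lines : List String) (func_start : Int) (bug_start : Int) (bug_end : Int) (out : List String) : Decidable (Spec_add_bug_token_for_func lines func_start bug_start bug_end out) := by unfold Spec_add_bug_token_for_func; infer_instance

-- ===== CLAIM (what is proved, stated in full; the proofs are below) =====
def Claim_equal_add_bug_token_for_func : Prop := ∀ (lines : List String) (func_start : Int) (bug_start : Int) (bug_end : Int), Dom_add_bug_token_for_func lines func_start bug_start bug_end → Spec_add_bug_token_for_func lines func_start bug_start bug_end (add_bug_token_for_func lines func_start bug_start bug_end)

-- ===== LEMMAS AND PROOFS =====

-- A's loop is a map over the index range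
theorem portA_eq_map (lines : List String) (func_start bug_start bug_end : Int) :
    add_bug_token_for_func lines func_start bug_start bug_end =
      (PySem.List.pyRange 0 (lines.length : Int) 1).map
        (fun i => if bug_start ≤ func_start + i ∧ func_start + i ≤ bug_end
                  then "[BUG] " ++ PySem.List.pyGetD lines i ""
                  else PySem.List.pyGetD lines i "") := by
  unfold add_bug_token_for_func
  rw [show (fun (result : List String) (i : Int) =>
      let line := PySem.List.pyGetD lines i ""
      let curr_line := func_start + i
      if bug_start ≤ curr_line ∧ curr_line ≤ bug_end then result ++ ["[BUG] " ++ line]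
      else result ++ [line]) =
      (fun (result : List String) (i : Int) =>
        result ++ [if bug_start ≤ func_start + i ∧ func_start + i ≤ bug_end
                   then "[BUG] " ++ PySem.List.pyGetD lines i ""
                   else PySem.List.pyGetD lines i ""]) from by
    funext result i; by_cases h : bug_start ≤ func_start + i ∧ func_start + i ≤ bug_end <;> simp [h]]
  rw [PySem.List.foldl_append_singleton_eq_map]
  simp [PySem.List.len_eq]

-- a sub-range of valid indices, mapped through pyGetD, is the corresponding drop/take window
theorem seg (lines : List String) (a b : Int) (h0 : 0 ≤ a) (hab : a ≤ b)
    (hbn : b ≤ (lines.length : Int)) :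
    (PySem.List.pyRange a b 1).map (fun j => PySem.List.pyGetD lines j "") =
      (lines.drop a.toNat).take (b.toNat - a.toNat) := by
  have h1 := PySem.List.map_pyGetD_pyRange (xs := lines) (a := a) (d := "") h0
  have h2 := PySem.List.map_pyGetD_pyRange (xs := lines) (a := b) (d := "") (le_trans h0 hab)
  rw [PySem.List.pyRange_one_append a b (PySem.List.len lines)
        hab (by simpa [PySem.List.len_eq] using hbn),
      List.map_append, h2] at h1
  have h3 : lines.drop a.toNat =
      (lines.drop a.toNat).take (b.toNat - a.toNat) ++ lines.drop b.toNat := by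
    conv_lhs => rw [← List.take_append_drop (b.toNat - a.toNat) (lines.drop a.toNat)]
    rw [List.drop_drop]
    congr 2
    omega
  rw [h3] at h1
  exact List.append_cancel_right h1

-- ===== VERDICT (by name: the statement is the Claim_ definition above) =====
theorem add_bug_token_for_func_spec : Claim_equal_add_bug_token_for_func := by
  intro lines func_start bug_start bug_end _
  show _ = _
  rw [portA_eq_map]
  unfold add_bug_token_for_func_alt
  simp only [PySem.List.len_eq]
  set n : Int := (lines.length : Int) with hn
  set lo : Int := max 0 (bug_start - func_start) with hlo
  set hi : Int := max lo (min n (bug_end - func_start + 1)) with hhi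
  have hlo0 : 0 ≤ lo := le_max_left _ _
  have hlohi : lo ≤ hi := le_max_left _ _
  have hhi0 : 0 ≤ hi := le_trans hlo0 hlohi
  set m1 : Int := min lo n with hm1
  set m2 : Int := min hi n with hm2
  have hs1 : PySem.List.slice lines none (some lo) = lines.take lo.toNat :=
    PySem.List.slice_to lines hlo0
  have hs2 : PySem.List.slice lines (some lo) (some hi) =
      (lines.drop lo.toNat).take (hi.toNat - lo.toNat) :=
    PySem.List.slice_toNat lines hlo0 hhi0
  have hs3 : PySem.List.slice lines (some hi) none = lines.drop hi.toNat :=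
    PySem.List.slice_from lines hhi0
  rw [hs1, hs2, hs3]
  rw [show PySem.List.pyRange 0 n 1 =
        PySem.List.pyRange 0 m1 1 ++ (PySem.List.pyRange m1 m2 1 ++ PySem.List.pyRange m2 n 1) from by
    rw [← PySem.List.pyRange_one_append m1 m2 n (by omega) (by omega),
        ← PySem.List.pyRange_one_append 0 m1 n (by omega) (by omega)]]
  rw [List.map_append, List.map_append]
  have p1 : (PySem.List.pyRange 0 m1 1).map
      (fun i => if bug_start ≤ func_start + i ∧ func_start + i ≤ bug_end
                then "[BUG] " ++ PySem.List.pyGetD lines i ""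
                else PySem.List.pyGetD lines i "") = lines.take lo.toNat := by
    rw [List.map_congr_left (g := fun j => PySem.List.pyGetD lines j "") (by
      intro j hj
      rw [PySem.List.mem_pyRange_one] at hj
      rw [if_neg (by omega)])]
    rw [seg lines 0 m1 le_rfl (by omega) (by omega)]
    simp only [Int.toNat_zero, List.drop_zero, Nat.sub_zero]
    by_cases h : lo ≤ n
    · have : m1 = lo := by omega
      rw [this]
    · have hm1n : m1 = n := by omega
      rw [hm1n, List.take_of_length_le (by omega), List.take_of_length_le (by omega)]
  have p2 : (PySem.List.pyRange m1 m2 1).map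
      (fun i => if bug_start ≤ func_start + i ∧ func_start + i ≤ bug_end
                then "[BUG] " ++ PySem.List.pyGetD lines i ""
                else PySem.List.pyGetD lines i "") =
      ((lines.drop lo.toNat).take (hi.toNat - lo.toNat)).map (fun line => "[BUG] " ++ line) := by
    rw [List.map_congr_left (g := fun j => "[BUG] " ++ PySem.List.pyGetD lines j "") (by
      intro j hj
      rw [PySem.List.mem_pyRange_one] at hj
      rw [if_pos (by constructor <;> omega)])]
    rw [show (fun j => "[BUG] " ++ PySem.List.pyGetD lines j "") =
        (fun line => "[BUG] " ++ line) ∘ (fun j => PySem.List.pyGetD lines j "") from rfl,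
      ← List.map_map, seg lines m1 m2 (by omega) (by omega) (by omega)]
    congr 1
    by_cases h : lo ≤ n
    · have e1 : m1 = lo := by omega
      by_cases h2 : hi ≤ n
      · have e2 : m2 = hi := by omega
        rw [e1, e2]
      · have e2 : m2 = n := by omega
        rw [e1, e2, List.take_of_length_le (by simp; omega), List.take_of_length_le (by simp; omega)]
    · have e1 : m1 = n := by omega
      have e2 : m2 = n := by omega
      rw [e1, e2, List.drop_eq_nil_of_le (by omega), List.drop_eq_nil_of_le (by omega)]
      simp
  have p3 : (PySem.List.pyRange m2 n 1).map
      (fun i => if bug_start ≤ func_start + i ∧ func_start + i ≤ bug_end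
                then "[BUG] " ++ PySem.List.pyGetD lines i ""
                else PySem.List.pyGetD lines i "") = lines.drop hi.toNat := by
    rw [List.map_congr_left (g := fun j => PySem.List.pyGetD lines j "") (by
      intro j hj
      rw [PySem.List.mem_pyRange_one] at hj
      rw [if_neg (by omega)])]
    rw [seg lines m2 n (by omega) (by omega) (by omega)]
    rw [List.take_of_length_le (by simp; omega)]
    by_cases h : hi ≤ n
    · have : m2 = hi := by omega
      rw [this]
    · have e2 : m2 = n := by omega
      rw [e2, List.drop_eq_nil_of_le (by omega), List.drop_eq_nil_of_le (by omega)]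
  rw [p1, p2, p3, List.append_assoc]
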